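-- pv_equiv track=rewrite | github.com/wzygxr/shuati | class046_StringDynamicProgramming/Code05_MinimumDeleteBecomeSubstring.py | minDelete2
-- ===== SOURCE A (Python) =====
-- def minDelete2(str1: str, str2: str) -> int:
--     """
--     最少删除字符成为子串问题 - 动态规划解法
--
--     状态定义：
--     dp[i][j] 表示s1的前i个字符至少删除多少字符，可以变成s2的前j个字符的后缀
--
--     状态转移方程：
--     如果 s1[i-1] == s2[j-1]
--       dp[i][j] = dp[i-1][j-1]  # 不需要删除
--     否则
--       dp[i][j] = dp[i-1][j] + 1  # 必须删除s1[i-1]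
--
--     解释：
--     我们的目标是让s1的一个子序列成为s2的子串
--     所以对于s1的前i个字符，我们要让它变成s2的某个后缀（这样就能成为子串）
--
--     边界条件：
--     dp[0][j] = 0，表示空字符串不需要删除就能成为任何字符串的后缀
--     dp[i][0] = i，表示s1的前i个字符要变成空字符串需要删除i个字符
--
--     最终答案：
--     min{dp[n][j]} for j in [0, m]
--
--     参数:
--         str1 (str): 源字符串
--         str2 (str): 目标字符串
--
--     返回:
--         int: s1至少需要删除的字符数
--     """
--     # 输入验证
--     if str1 is None or str2 is None:
--         raise ValueError("输入字符串不能为None")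
--
--     n, m = len(str1), len(str2)
--
--     # 边界情况处理
--     if n == 0:
--         return 0  # 空字符串不需要删除
--     if m == 0:
--         return n  # 目标字符串为空，需要删除所有字符
--
--     # dp[i][j]: s1前i个字符至少删除多少字符，可以变成s2前j个字符的任意后缀串
--     dp = [[0] * (m + 1) for _ in range(n + 1)]
--
--     # 边界条件
--     for i in range(1, n + 1):
--         dp[i][0] = i  # s1的前i个字符要变成空字符串需要删除i个字符
--     # dp[0][j] = 0 默认初始化为0，表示空字符串不需要删除
--
--     # 填充dp表
--     for i in range(1, n + 1):
--         for j in range(1, m + 1):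
--             if str1[i - 1] == str2[j - 1]:
--                 # 字符相同，不需要删除
--                 dp[i][j] = dp[i - 1][j - 1]
--             else:
--                 # 字符不同，必须删除s1[i-1]
--                 dp[i][j] = dp[i - 1][j] + 1
--
--     # 寻找最小删除数
--     # 遍历所有可能的j值，找到最小的dp[n][j]
--     ans = float('inf')
--     for j in range(m + 1):
--         ans = min(ans, dp[n][j])
--
--     return int(ans)
-- ===== SOURCE B (Python) =====
-- def minDelete2(str1: str, str2: str) -> int:
--     # answer = n - length of the longest contiguous substring of str2
--     # that is a subsequence of str1 (greedy two-pointer per start index)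
--     if str1 is None or str2 is None:
--         raise ValueError("输入字符串不能为None")
--     n, m = len(str1), len(str2)
--     if n == 0:
--         return 0
--     if m == 0:
--         return n
--     best = 0
--     for j in range(m):
--         k = j
--         for c in str1:
--             if k < m and c == str2[k]:
--                 k += 1
--         if k - j > best:
--             best = k - j
--     return n - best
-- ===== Notes on version B (the rewrite author's own statement) =====
-- stated objective: simpler
-- what changed: Replaced the (n+1)x(m+1) suffix-DP table plus final min-scan by the identity answer = n - (longest contiguous substring of str2 that is a subsequence of str1), computed with a greedy two-pointer scan of str1 for each start index of str2.
import Mathlib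
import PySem

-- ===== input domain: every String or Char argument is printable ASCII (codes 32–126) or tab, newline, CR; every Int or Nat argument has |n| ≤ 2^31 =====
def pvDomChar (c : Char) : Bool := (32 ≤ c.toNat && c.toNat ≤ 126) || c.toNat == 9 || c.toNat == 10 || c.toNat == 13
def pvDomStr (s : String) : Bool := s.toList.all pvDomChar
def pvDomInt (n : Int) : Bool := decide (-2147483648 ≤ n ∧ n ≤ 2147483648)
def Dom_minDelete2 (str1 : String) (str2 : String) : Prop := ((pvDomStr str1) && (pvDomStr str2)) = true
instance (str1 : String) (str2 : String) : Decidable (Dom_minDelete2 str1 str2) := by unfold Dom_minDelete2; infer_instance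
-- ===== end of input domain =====

-- B replaces A's (n+1)x(m+1) suffix-DP table + final min-scan by
-- "n minus the longest contiguous substring of str2 that is a subsequence of str1",
-- found with a greedy two-pointer scan per start index (objective: simpler).

-- ===== PORT A =====
-- dp[i][j] read and write on the 2-D list table (indices are in range wherever used)
def dpGet (dp : List (List Int)) (i j : Int) : Int :=
  PySem.List.pyGetD (PySem.List.pyGetD dp i []) j 0

def dpSet (dp : List (List Int)) (i j v : Int) : List (List Int) :=
  PySem.List.pySetD dp i (PySem.List.pySetD (PySem.List.pyGetD dp i []) j v)

def minDelete2 (str1 : String) (str2 : String) : Int :=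
  let l1 := str1.toList
  let l2 := str2.toList
  let n : Int := l1.length
  let m : Int := l2.length
  if n = 0 then 0
  else if m = 0 then n
  else
    -- dp = [[0] * (m + 1) for _ in range(n + 1)]
    let dp0 : List (List Int) := List.replicate (l1.length + 1) (List.replicate (l2.length + 1) 0)
    -- for i in range(1, n + 1): dp[i][0] = i
    let dp1 := (PySem.List.pyRange 1 (n + 1) 1).foldl (fun dp i => dpSet dp i 0 i) dp0
    -- for i in range(1, n + 1): for j in range(1, m + 1): ...
    let dp2 := (PySem.List.pyRange 1 (n + 1) 1).foldl (fun dp i =>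
        (PySem.List.pyRange 1 (m + 1) 1).foldl (fun dp j =>
          if PySem.List.pyGetD l1 (i - 1) ' ' = PySem.List.pyGetD l2 (j - 1) ' ' then
            dpSet dp i j (dpGet dp (i - 1) (j - 1))
          else
            dpSet dp i j (dpGet dp (i - 1) j + 1)) dp) dp1
    -- ans = float('inf'); for j in range(m + 1): ans = min(ans, dp[n][j])  (none = inf)
    let ans := (PySem.List.pyRange 0 (m + 1) 1).foldl (fun acc j =>
        match acc with
        | none => some (dpGet dp2 n j)
        | some v => some (min v (dpGet dp2 n j))) (none : Option Int)
    -- return int(ans); the loop ran ≥ 1 time (m ≥ 1 here), so ans is never none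
    ans.getD 0

-- ===== PORT B =====
def minDelete2_alt (str1 : String) (str2 : String) : Int :=
  let l1 := str1.toList
  let l2 := str2.toList
  let n : Int := l1.length
  let m : Int := l2.length
  if n = 0 then 0
  else if m = 0 then n
  else
    let best := (PySem.List.pyRange 0 m 1).foldl (fun best j =>
      -- k = j; for c in str1: if k < m and c == str2[k]: k += 1
      let k := l1.foldl (fun k c =>
        if k < m ∧ c = PySem.List.pyGetD l2 k ' ' then k + 1 else k) j
      if k - j > best then k - j else best) 0
    n - best

-- ===== PRECONDITION & SPEC =====
def Spec_minDelete2 (str1 : String) (str2 : String) (out : Int) : Prop := out = minDelete2_alt str1 str2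
instance (str1 : String) (str2 : String) (out : Int) : Decidable (Spec_minDelete2 str1 str2 out) := by unfold Spec_minDelete2; infer_instance

-- ===== CLAIM (what is proved, stated in full; the proofs are below) =====
def Claim_equal_minDelete2 : Prop := ∀ (str1 : String) (str2 : String), Dom_minDelete2 str1 str2 → Spec_minDelete2 str1 str2 (minDelete2 str1 str2)

-- ===== LEMMAS AND PROOFS =====

-- greedy matcher: how many leading chars of t can be matched, in order, inside s
def mrun : List Char → List Char → Nat
  | [], _ => 0
  | _ :: _, [] => 0
  | c :: s, d :: t => if c = d then mrun s t + 1 else mrun s (d :: t)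

theorem mrun_nil_right (s : List Char) : mrun s [] = 0 := by cases s <;> rfl

theorem mrun_le_right (s t : List Char) : mrun s t ≤ t.length := by
  induction s generalizing t with
  | nil => simp [mrun]
  | cons c s ih =>
    cases t with
    | nil => simp [mrun]
    | cons d t =>
      by_cases h : c = d
      · simpa [mrun, h] using ih t
      · simpa [mrun, h] using ih (d :: t)

theorem take_mrun_sublist (s t : List Char) : (t.take (mrun s t)).Sublist s := by
  induction s generalizing t with
  | nil => simp [mrun]
  | cons c s ih =>
    cases t with
    | nil => simp [mrun]
    | cons d t =>
      by_cases h : c = d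
      · subst h
        simpa [mrun] using (ih t).cons₂ c
      · simp only [mrun, if_neg h]
        exact (ih (d :: t)).cons c

theorem le_mrun (s t : List Char) (L : Nat) (h1 : L ≤ t.length) (h2 : (t.take L).Sublist s) :
    L ≤ mrun s t := by
  induction s generalizing t L with
  | nil =>
    have h3 : t.take L = [] := List.sublist_nil.mp h2
    have hlen := congrArg List.length h3
    simp only [List.length_take, List.length_nil] at hlen
    have hm0 : mrun [] t = 0 := rfl
    omega
  | cons c s ih =>
    cases t with
    | nil =>
      have hL0 : L = 0 := by simpa using h1
      subst hL0
      exact Nat.zero_le _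
    | cons d t =>
      cases L with
      | zero => exact Nat.zero_le _
      | succ L =>
        simp only [List.take_succ_cons] at h2
        by_cases h : c = d
        · subst h
          have ht : (t.take L).Sublist s := by
            cases h2 with
            | cons _ h' => exact (List.sublist_cons_self _ _).trans h'
            | cons₂ _ h' => exact h'
          have hL : L ≤ t.length := by simpa using Nat.le_of_succ_le_succ h1
          simpa [mrun] using Nat.succ_le_succ (ih t L hL ht)
        · simp only [mrun, if_neg h]
          cases h2 with
          | cons _ h' => exact ih (d :: t) (L + 1) (by simpa using h1) (by simpa using h')
          | cons₂ _ _ => exact absurd rfl h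

-- max of f over [0, K)
def listMax (f : Nat → Nat) : Nat → Nat
  | 0 => 0
  | K + 1 => max (listMax f K) (f K)

theorem le_listMax (f : Nat → Nat) (k K : Nat) (h : k < K) : f k ≤ listMax f K := by
  induction K with
  | zero => omega
  | succ K ih =>
    rcases Nat.lt_succ_iff_lt_or_eq.mp h with h' | h'
    · exact le_trans (ih h') (Nat.le_max_left _ _)
    · subst h'; exact Nat.le_max_right _ _

theorem listMax_le (f : Nat → Nat) (K c : Nat) (h : ∀ k, k < K → f k ≤ c) :
    listMax f K ≤ c := by
  induction K with
  | zero => simp [listMax]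
  | succ K ih =>
    exact Nat.max_le.mpr ⟨ih (fun k hk => h k (by omega)), h K (by omega)⟩

-- B's quantity: longest prefix of l2.drop j that is a subsequence of l1
def Fj (l1 l2 : List Char) (j : Nat) : Nat := mrun l1 (l2.drop j)
-- A's quantity: longest suffix of l2.take j that is a subsequence of l1 (matched backwards)
def Gj (l1 l2 : List Char) (j : Nat) : Nat := mrun l1.reverse ((l2.take j).reverse)

theorem Gj_le_maxF (l1 l2 : List Char) (j : Nat) (hj : j ≤ l2.length) :
    Gj l1 l2 j ≤ listMax (Fj l1 l2) l2.length := by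
  obtain ⟨L, hLdef⟩ : ∃ L, Gj l1 l2 j = L := ⟨_, rfl⟩
  rw [hLdef]
  have hLdef' : mrun l1.reverse ((l2.take j).reverse) = L := hLdef
  rcases Nat.eq_zero_or_pos L with h0 | hpos
  · subst h0; exact Nat.zero_le _
  · have hLj : L ≤ j := by
      have h := mrun_le_right l1.reverse ((l2.take j).reverse)
      rw [hLdef'] at h
      simp only [List.length_reverse, List.length_take] at h
      omega
    have hsub := take_mrun_sublist l1.reverse ((l2.take j).reverse)
    rw [hLdef', List.take_reverse, List.reverse_sublist] at hsub
    have hlen : (l2.take j).length = j := by simp only [List.length_take]; omega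
    rw [hlen, List.drop_take, show j - (j - L) = L from by omega] at hsub
    have hfj : L ≤ Fj l1 l2 (j - L) :=
      le_mrun l1 (l2.drop (j - L)) L (by simp only [List.length_drop]; omega) hsub
    exact le_trans hfj (le_listMax _ _ _ (by omega))

theorem Fj_le_maxG (l1 l2 : List Char) (j : Nat) (hj : j < l2.length) :
    Fj l1 l2 j ≤ listMax (Gj l1 l2) (l2.length + 1) := by
  obtain ⟨L, hLdef⟩ : ∃ L, Fj l1 l2 j = L := ⟨_, rfl⟩
  rw [hLdef]
  have hLdef' : mrun l1 (l2.drop j) = L := hLdef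
  have hLlen : L ≤ l2.length - j := by
    have h := mrun_le_right l1 (l2.drop j)
    rw [hLdef'] at h
    simpa [List.length_drop] using h
  have hsub := take_mrun_sublist l1 (l2.drop j)
  rw [hLdef', List.take_drop] at hsub
  have hsub2 : (((l2.take (j + L)).drop j).reverse).Sublist l1.reverse :=
    List.reverse_sublist.mpr hsub
  have hlen : (l2.take (j + L)).length = j + L := by
    simp only [List.length_take]; omega
  have hrw : ((l2.take (j + L)).reverse).take L = ((l2.take (j + L)).drop j).reverse := by
    rw [List.take_reverse, hlen, show j + L - L = j from by omega]
  have hG : L ≤ Gj l1 l2 (j + L) :=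
    le_mrun l1.reverse ((l2.take (j + L)).reverse) L
      (by simp only [List.length_reverse, List.length_take]; omega)
      (by rw [hrw]; exact hsub2)
  exact le_trans hG (le_listMax _ _ _ (by omega))

theorem maxFG (l1 l2 : List Char) :
    listMax (Gj l1 l2) (l2.length + 1) = listMax (Fj l1 l2) l2.length := by
  apply le_antisymm
  · exact listMax_le _ _ _ (fun j hj => Gj_le_maxF l1 l2 j (by omega))
  · exact listMax_le _ _ _ (fun j hj => Fj_le_maxG l1 l2 j hj)

-- ---------- B-side: the inner fold computes j + Fj ----------

theorem B_inner (l1 l2 : List Char) (k : Nat) (hk : k ≤ l2.length) :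
    l1.foldl (fun k c =>
      if k < (l2.length : Int) ∧ c = PySem.List.pyGetD l2 k ' ' then k + 1 else k) (k : Int)
      = (k : Int) + mrun l1 (l2.drop k) := by
  induction l1 generalizing k with
  | nil => simp [mrun]
  | cons c s ih =>
    rcases Nat.lt_or_ge k l2.length with hlt | hge
    · rw [List.foldl_cons]
      have hd : PySem.List.pyGetD l2 (k : Int) ' ' = l2[k] := by
        simp [List.getElem?_eq_getElem hlt]
      have hdrop : l2.drop k = l2[k] :: l2.drop (k + 1) := (List.getElem_cons_drop hlt).symm
      by_cases hc : c = l2[k]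
      · rw [if_pos ⟨by exact_mod_cast hlt, by rw [hd]; exact hc⟩]
        rw [show (k : Int) + 1 = ((k + 1 : Nat) : Int) from by push_cast; ring,
          ih (k + 1) (by omega), hdrop]
        simp only [mrun, if_pos hc]
        push_cast; ring
      · rw [if_neg (by rintro ⟨_, h2⟩; rw [hd] at h2; exact hc h2)]
        rw [ih k (by omega), hdrop]
        simp only [mrun, if_neg hc]
    · have hk' : k = l2.length := by omega
      subst hk'
      rw [List.foldl_cons, if_neg (by rintro ⟨h', _⟩; exact lt_irrefl _ h')]
      rw [ih l2.length (le_refl _)]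
      simp [List.drop_length, mrun_nil_right]

theorem B_outer (l1 l2 : List Char) (K : Nat) (hK : K ≤ l2.length) :
    (PySem.List.pyRange 0 (K : Int) 1).foldl (fun best j =>
      let k := l1.foldl (fun k c =>
        if k < (l2.length : Int) ∧ c = PySem.List.pyGetD l2 k ' ' then k + 1 else k) j
      if k - j > best then k - j else best) 0
      = (listMax (Fj l1 l2) K : Int) := by
  induction K with
  | zero =>
    rw [show ((0 : Nat) : Int) = 0 from rfl, PySem.List.pyRange_one_eq_nil (by omega)]
    simp [listMax]
  | succ K ih =>
    rw [show ((K + 1 : Nat) : Int) = ((K : Int) + 1) from by push_cast; ring,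
      PySem.List.pyRange_one_succ_right (by omega : (0 : Int) ≤ ((K : Nat) : Int)),
      List.foldl_append, ih (by omega)]
    simp only [List.foldl_cons, List.foldl_nil]
    rw [B_inner l1 l2 K (by omega)]
    rw [show listMax (Fj l1 l2) (K + 1) = max (listMax (Fj l1 l2) K) (Fj l1 l2 K) from rfl]
    simp only [Fj]
    split_ifs with h
    · push_cast at h ⊢; omega
    · push_cast at h ⊢; omega

theorem altEq (str1 str2 : String) (hn : str1.toList.length ≠ 0) (hm : str2.toList.length ≠ 0) :
    minDelete2_alt str1 str2
      = (str1.toList.length : Int)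
        - (listMax (Fj str1.toList str2.toList) str2.toList.length : Int) := by
  simp only [minDelete2_alt]
  rw [if_neg (by exact_mod_cast hn), if_neg (by exact_mod_cast hm)]
  rw [B_outer str1.toList str2.toList str2.toList.length (le_refl _)]

-- ---------- A-side: the dp table holds i - Gij ----------

def Gij (l1 l2 : List Char) (i j : Nat) : Nat := mrun (l1.take i).reverse ((l2.take j).reverse)

theorem Gij_zero_left (l1 l2 : List Char) (j : Nat) : Gij l1 l2 0 j = 0 := by
  simp [Gij, mrun]

theorem Gij_zero_right (l1 l2 : List Char) (i : Nat) : Gij l1 l2 i 0 = 0 := by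
  simp [Gij, mrun_nil_right]

theorem Gij_full (l1 l2 : List Char) (j : Nat) : Gij l1 l2 l1.length j = Gj l1 l2 j := by
  simp [Gij, Gj, List.take_length]

theorem Gij_succ (l1 l2 : List Char) (i j : Nat) (hi : i < l1.length) (hj : j < l2.length) :
    Gij l1 l2 (i + 1) (j + 1)
      = if l1[i] = l2[j] then Gij l1 l2 i j + 1 else Gij l1 l2 i (j + 1) := by
  have h1 : l1.take (i + 1) = l1.take i ++ [l1[i]] := by
    rw [List.take_succ]; simp [List.getElem?_eq_getElem hi]
  have h2 : l2.take (j + 1) = l2.take j ++ [l2[j]] := by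
    rw [List.take_succ]; simp [List.getElem?_eq_getElem hj]
  unfold Gij
  rw [h1, h2]
  simp only [List.reverse_append, List.reverse_singleton, List.singleton_append]
  rfl

-- the intended table values
def dpFv (l1 l2 : List Char) (i j : Nat) : Int := (i : Int) - (Gij l1 l2 i j : Int)

theorem dpFv_rec (l1 l2 : List Char) (i j : Nat) (hi1 : 1 ≤ i) (hi2 : i ≤ l1.length)
    (hj1 : 1 ≤ j) (hj2 : j ≤ l2.length) :
    dpFv l1 l2 i j = if l1[i - 1] = l2[j - 1] then dpFv l1 l2 (i - 1) (j - 1)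
      else dpFv l1 l2 (i - 1) j + 1 := by
  have hi' : i - 1 < l1.length := by omega
  have hj' : j - 1 < l2.length := by omega
  have h := Gij_succ l1 l2 (i - 1) (j - 1) hi' hj'
  rw [show i - 1 + 1 = i from by omega, show j - 1 + 1 = j from by omega] at h
  unfold dpFv
  rw [h]
  split_ifs with hc
  · push_cast; omega
  · push_cast; omega

-- an (n+1)×(m+1) table whose (i, j) entry is f i j
def mkTbl (n m : Nat) (f : Nat → Nat → Int) : List (List Int) :=
  (List.range (n + 1)).map (fun i => (List.range (m + 1)).map (fun j => f i j))

theorem mkTbl_get (n m : Nat) (f : Nat → Nat → Int) (i j : Nat)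
    (hi : i < n + 1) (hj : j < m + 1) :
    dpGet (mkTbl n m f) (i : Int) (j : Int) = f i j := by
  unfold dpGet mkTbl
  rw [PySem.List.pyGetD_natCast, PySem.List.pyGetD_natCast]
  simp [List.getD_eq_getElem?_getD, List.getElem?_map, List.getElem?_range, hi, hj]

theorem map_range_set {α : Type} (K k : Nat) (g : Nat → α) (w : α) (hk : k < K) :
    ((List.range K).map g).set k w = (List.range K).map (fun x => if x = k then w else g x) := by
  apply List.ext_getElem
  · simp
  · intro a ha hb
    simp only [List.length_set, List.length_map, List.length_range] at ha hb
    simp only [List.getElem_set, List.getElem_map, List.getElem_range]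
    by_cases h : k = a
    · rw [if_pos h, if_pos (by omega)]
    · rw [if_neg h, if_neg (by omega)]

theorem mkTbl_set (n m : Nat) (f : Nat → Nat → Int) (i j : Nat) (v : Int)
    (hi : i < n + 1) (hj : j < m + 1) :
    dpSet (mkTbl n m f) (i : Int) (j : Int) v
      = mkTbl n m (fun i' j' => if i' = i ∧ j' = j then v else f i' j') := by
  unfold dpSet
  have hrow : PySem.List.pyGetD (mkTbl n m f) (i : Int) []
      = (List.range (m + 1)).map (fun j => f i j) := by
    unfold mkTbl
    rw [PySem.List.pyGetD_natCast]
    simp [List.getD_eq_getElem?_getD, List.getElem?_map, List.getElem?_range, hi]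
  rw [hrow, PySem.List.pySetD_natCast, PySem.List.pySetD_natCast]
  unfold mkTbl
  rw [map_range_set (m + 1) j (fun j => f i j) v hj,
    map_range_set (n + 1) i (fun i => (List.range (m + 1)).map (fun j => f i j)) _ hi]
  apply List.map_congr_left
  intro a _
  by_cases hia : a = i
  · subst hia
    rw [if_pos rfl]
    apply List.map_congr_left
    intro b _
    beta_reduce
    split_ifs <;> omega
  · rw [if_neg hia]
    apply List.map_congr_left
    intro b _
    beta_reduce
    split_ifs <;> omega

theorem mkTbl_getI (n m : Nat) (f : Nat → Nat → Int) (ii jj : Int)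
    (h1 : 0 ≤ ii) (h2 : ii < ((n + 1 : Nat) : Int)) (h3 : 0 ≤ jj) (h4 : jj < ((m + 1 : Nat) : Int)) :
    dpGet (mkTbl n m f) ii jj = f ii.toNat jj.toNat := by
  obtain ⟨i, rfl⟩ : ∃ i : Nat, ii = (i : Int) := ⟨ii.toNat, by omega⟩
  obtain ⟨j, rfl⟩ : ∃ j : Nat, jj = (j : Int) := ⟨jj.toNat, by omega⟩
  rw [mkTbl_get n m f i j (by omega) (by omega)]
  simp

theorem mkTbl_setI (n m : Nat) (f : Nat → Nat → Int) (ii jj : Int) (v : Int)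
    (h1 : 0 ≤ ii) (h2 : ii < ((n + 1 : Nat) : Int)) (h3 : 0 ≤ jj) (h4 : jj < ((m + 1 : Nat) : Int)) :
    dpSet (mkTbl n m f) ii jj v
      = mkTbl n m (fun i' j' => if (i' : Int) = ii ∧ (j' : Int) = jj then v else f i' j') := by
  obtain ⟨i, rfl⟩ : ∃ i : Nat, ii = (i : Int) := ⟨ii.toNat, by omega⟩
  obtain ⟨j, rfl⟩ : ∃ j : Nat, jj = (j : Int) := ⟨jj.toNat, by omega⟩
  rw [mkTbl_set n m f i j v (by omega) (by omega)]
  apply List.map_congr_left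
  intro a _
  apply List.map_congr_left
  intro b _
  beta_reduce
  split_ifs <;> omega

theorem mkTbl_congr (n m : Nat) (f g : Nat → Nat → Int)
    (h : ∀ i, i ≤ n → ∀ j, j ≤ m → f i j = g i j) : mkTbl n m f = mkTbl n m g := by
  unfold mkTbl
  apply List.map_congr_left
  intro i hi
  apply List.map_congr_left
  intro j hj
  exact h i (by simpa [Nat.lt_succ_iff] using List.mem_range.mp hi) j
    (by simpa [Nat.lt_succ_iff] using List.mem_range.mp hj)

-- table contents after the boundary pass and after the first K full rows
def tblF (l1 l2 : List Char) (K : Nat) (i j : Nat) : Int :=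
  if 1 ≤ i ∧ j = 0 then (i : Int)
  else if 1 ≤ i ∧ i ≤ K ∧ 1 ≤ j then dpFv l1 l2 i j
  else 0

theorem tblF_read (l1 l2 : List Char) (K i j : Nat) (hi : i ≤ K) :
    tblF l1 l2 K i j = dpFv l1 l2 i j := by
  unfold tblF
  split_ifs with h1 h2
  · obtain ⟨a1, a2⟩ := h1
    subst a2
    simp [dpFv, Gij_zero_right]
  · rfl
  · have hi0 : i = 0 := by omega
    subst hi0
    simp [dpFv, Gij_zero_left]

-- boundary pass: for i in range(1, n+1): dp[i][0] = i
theorem bnd_fold (l1 l2 : List Char) :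
    (PySem.List.pyRange 1 ((l1.length : Int) + 1) 1).foldl
      (fun dp i => dpSet dp i 0 i)
      (List.replicate (l1.length + 1) (List.replicate (l2.length + 1) 0))
      = mkTbl l1.length l2.length (tblF l1 l2 0) := by
  have hrep : List.replicate (l1.length + 1) (List.replicate (l2.length + 1) (0 : Int))
      = mkTbl l1.length l2.length (fun _ _ => 0) := by
    unfold mkTbl
    apply List.ext_getElem
    · simp
    · intro a ha ha'
      simp only [List.length_replicate] at ha
      rw [List.getElem_replicate, List.getElem_map, List.getElem_range]
      apply List.ext_getElem
      · simp
      · intro b hb hb'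
        simp only [List.length_replicate] at hb
        rw [List.getElem_replicate, List.getElem_map, List.getElem_range]
  rw [hrep]
  have main : ∀ K : Nat, K ≤ l1.length →
      (PySem.List.pyRange 1 ((K : Int) + 1) 1).foldl (fun dp i => dpSet dp i 0 i)
        (mkTbl l1.length l2.length (fun _ _ => 0))
      = mkTbl l1.length l2.length
          (fun i j => if 1 ≤ i ∧ i ≤ K ∧ j = 0 then (i : Int) else 0) := by
    intro K
    induction K with
    | zero =>
      intro _
      rw [PySem.List.pyRange_one_eq_nil (by omega : ((0 : Nat) : Int) + 1 ≤ 1)]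
      simp only [List.foldl_nil]
      exact mkTbl_congr _ _ _ _ (fun i hi j hj => by
        rw [if_neg (by omega)])
    | succ K ih =>
      intro hK
      rw [show ((K + 1 : Nat) : Int) + 1 = ((K : Int) + 1) + 1 from by push_cast; ring,
        PySem.List.pyRange_one_succ_right (by omega : (1 : Int) ≤ ((K : Nat) : Int) + 1),
        List.foldl_append, ih (by omega)]
      simp only [List.foldl_cons, List.foldl_nil]
      rw [mkTbl_setI _ _ _ _ _ _ (by omega) (by push_cast; omega) (by omega) (by push_cast; omega)]
      exact mkTbl_congr _ _ _ _ (fun i hi j hj => by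
        split_ifs <;> push_cast at * <;> omega)
  rw [main l1.length (le_refl _)]
  exact mkTbl_congr _ _ _ _ (fun i hi j hj => by
    unfold tblF
    split_ifs <;> omega)

-- row state: row i filled up to column J, rows < i complete, rows > i untouched
def rowF (l1 l2 : List Char) (i J : Nat) (i' j' : Nat) : Int :=
  if i' = i ∧ 1 ≤ j' ∧ j' ≤ J then dpFv l1 l2 i j'
  else tblF l1 l2 (i - 1) i' j'

theorem row_fold (l1 l2 : List Char) (i : Nat) (hi1 : 1 ≤ i) (hi2 : i ≤ l1.length)
    (J : Nat) (hJ : J ≤ l2.length) :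
    (PySem.List.pyRange 1 ((J : Int) + 1) 1).foldl (fun dp j =>
        if PySem.List.pyGetD l1 ((i : Int) - 1) ' ' = PySem.List.pyGetD l2 (j - 1) ' ' then
          dpSet dp (i : Int) j (dpGet dp ((i : Int) - 1) (j - 1))
        else
          dpSet dp (i : Int) j (dpGet dp ((i : Int) - 1) j + 1))
      (mkTbl l1.length l2.length (tblF l1 l2 (i - 1)))
      = mkTbl l1.length l2.length (rowF l1 l2 i J) := by
  induction J with
  | zero =>
    rw [PySem.List.pyRange_one_eq_nil (by omega : ((0 : Nat) : Int) + 1 ≤ 1)]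
    simp only [List.foldl_nil]
    exact mkTbl_congr _ _ _ _ (fun i' hi' j' hj' => by
      unfold rowF
      rw [if_neg (by omega)])
  | succ J ih =>
    rw [show ((J + 1 : Nat) : Int) + 1 = ((J : Int) + 1) + 1 from by push_cast; ring,
      PySem.List.pyRange_one_succ_right (by omega : (1 : Int) ≤ ((J : Nat) : Int) + 1),
      List.foldl_append, ih (by omega)]
    simp only [List.foldl_cons, List.foldl_nil]
    have hi' : i - 1 < l1.length := by omega
    have hJ' : J < l2.length := by omega
    have hch1 : PySem.List.pyGetD l1 ((i : Int) - 1) ' ' = l1[i - 1] := by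
      rw [show (i : Int) - 1 = ((i - 1 : Nat) : Int) from by omega]
      simp [List.getElem?_eq_getElem hi']
    have hch2 : PySem.List.pyGetD l2 (((J : Int) + 1) - 1) ' ' = l2[J] := by
      rw [show ((J : Int) + 1) - 1 = ((J : Nat) : Int) from by omega]
      simp [List.getElem?_eq_getElem hJ']
    have hr1 : dpGet (mkTbl l1.length l2.length (rowF l1 l2 i J)) ((i : Int) - 1) (((J : Int) + 1) - 1)
        = dpFv l1 l2 (i - 1) J := by
      rw [mkTbl_getI _ _ _ _ _ (by omega) (by push_cast; omega) (by omega) (by push_cast; omega)]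
      rw [show ((i : Int) - 1).toNat = i - 1 from by omega,
        show (((J : Int) + 1) - 1).toNat = J from by omega]
      unfold rowF
      rw [if_neg (by omega), tblF_read l1 l2 (i - 1) (i - 1) J (le_refl _)]
    have hr2 : dpGet (mkTbl l1.length l2.length (rowF l1 l2 i J)) ((i : Int) - 1) ((J : Int) + 1)
        = dpFv l1 l2 (i - 1) (J + 1) := by
      rw [mkTbl_getI _ _ _ _ _ (by omega) (by push_cast; omega) (by omega) (by push_cast; omega)]
      rw [show ((i : Int) - 1).toNat = i - 1 from by omega,
        show ((J : Int) + 1).toNat = J + 1 from by omega]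
      unfold rowF
      rw [if_neg (by omega), tblF_read l1 l2 (i - 1) (i - 1) (J + 1) (le_refl _)]
    have hval := dpFv_rec l1 l2 i (J + 1) hi1 hi2 (by omega) (by omega)
    simp only [Nat.add_sub_cancel] at hval
    rw [hch1, hch2]
    split_ifs with hcc
    · rw [hr1,
        mkTbl_setI _ _ _ _ _ _ (by omega) (by push_cast; omega) (by omega) (by push_cast; omega)]
      exact mkTbl_congr _ _ _ _ (fun i' hI j' hj' => by
        by_cases hcell : i' = i ∧ j' = J + 1
        · obtain ⟨e1, e2⟩ := hcell
          subst e1; subst e2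
          rw [if_pos (by push_cast; omega)]
          unfold rowF
          rw [if_pos (by omega), hval, if_pos hcc]
        · rw [if_neg (by push_cast at hcell ⊢; omega)]
          unfold rowF
          by_cases h1 : i' = i ∧ 1 ≤ j' ∧ j' ≤ J
          · rw [if_pos h1, if_pos (by omega)]
          · rw [if_neg h1, if_neg (by omega)])
    · rw [hr2,
        mkTbl_setI _ _ _ _ _ _ (by omega) (by push_cast; omega) (by omega) (by push_cast; omega)]
      exact mkTbl_congr _ _ _ _ (fun i' hI j' hj' => by
        by_cases hcell : i' = i ∧ j' = J + 1
        · obtain ⟨e1, e2⟩ := hcell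
          subst e1; subst e2
          rw [if_pos (by push_cast; omega)]
          unfold rowF
          rw [if_pos (by omega), hval, if_neg hcc]
        · rw [if_neg (by push_cast at hcell ⊢; omega)]
          unfold rowF
          by_cases h1 : i' = i ∧ 1 ≤ j' ∧ j' ≤ J
          · rw [if_pos h1, if_pos (by omega)]
          · rw [if_neg h1, if_neg (by omega)])

theorem row_to_tbl (l1 l2 : List Char) (i : Nat) (hi1 : 1 ≤ i) (hi2 : i ≤ l1.length) :
    mkTbl l1.length l2.length (rowF l1 l2 i l2.length)
      = mkTbl l1.length l2.length (tblF l1 l2 i) := by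
  apply mkTbl_congr
  intro i' hi' j' hj'
  unfold rowF tblF
  by_cases h1 : i' = i ∧ 1 ≤ j' ∧ j' ≤ l2.length
  · obtain ⟨e1, e2, e3⟩ := h1
    subst e1
    rw [if_pos ⟨rfl, e2, e3⟩, if_neg (by omega), if_pos (by omega)]
  · rw [if_neg h1]
    by_cases h2 : 1 ≤ i' ∧ j' = 0
    · rw [if_pos h2, if_pos h2]
    · rw [if_neg h2, if_neg h2]
      by_cases h3 : 1 ≤ i' ∧ i' ≤ i - 1 ∧ 1 ≤ j'
      · rw [if_pos h3, if_pos (by omega)]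
      · rw [if_neg h3, if_neg (by omega)]

theorem outer_fold (l1 l2 : List Char) (K : Nat) (hK : K ≤ l1.length) :
    (PySem.List.pyRange 1 ((K : Int) + 1) 1).foldl (fun dp i =>
      (PySem.List.pyRange 1 ((l2.length : Int) + 1) 1).foldl (fun dp j =>
        if PySem.List.pyGetD l1 (i - 1) ' ' = PySem.List.pyGetD l2 (j - 1) ' ' then
          dpSet dp i j (dpGet dp (i - 1) (j - 1))
        else
          dpSet dp i j (dpGet dp (i - 1) j + 1)) dp)
      (mkTbl l1.length l2.length (tblF l1 l2 0))
      = mkTbl l1.length l2.length (tblF l1 l2 K) := by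
  induction K with
  | zero =>
    rw [PySem.List.pyRange_one_eq_nil (by omega : ((0 : Nat) : Int) + 1 ≤ 1)]
    simp
  | succ K ih =>
    rw [show ((K + 1 : Nat) : Int) + 1 = ((K : Int) + 1) + 1 from by push_cast; ring,
      PySem.List.pyRange_one_succ_right (by omega : (1 : Int) ≤ ((K : Nat) : Int) + 1),
      List.foldl_append, ih (by omega)]
    simp only [List.foldl_cons, List.foldl_nil]
    rw [show (K : Int) + 1 = ((K + 1 : Nat) : Int) from by push_cast; ring]
    have h := row_fold l1 l2 (K + 1) (by omega) (by omega) l2.length (le_refl _)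
    rw [show K + 1 - 1 = K from by omega] at h
    rw [h, row_to_tbl l1 l2 (K + 1) (by omega) (by omega)]

-- the final min-scan over row n
theorem ans_fold (l1 l2 : List Char) (hn : 1 ≤ l1.length) (K : Nat) (hK : K ≤ l2.length) :
    (PySem.List.pyRange 0 ((K : Int) + 1) 1).foldl (fun acc j =>
        match acc with
        | none => some (dpGet (mkTbl l1.length l2.length (tblF l1 l2 l1.length)) (l1.length : Int) j)
        | some v => some (min v (dpGet (mkTbl l1.length l2.length (tblF l1 l2 l1.length)) (l1.length : Int) j)))
      (none : Option Int)
      = some ((l1.length : Int)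
          - (listMax (fun j => Gij l1 l2 l1.length j) (K + 1) : Int)) := by
  have hread : ∀ j : Nat, j ≤ l2.length →
      dpGet (mkTbl l1.length l2.length (tblF l1 l2 l1.length)) (l1.length : Int) (j : Int)
        = (l1.length : Int) - (Gij l1 l2 l1.length j : Int) := by
    intro j hj
    rw [mkTbl_getI _ _ _ _ _ (by omega) (by push_cast; omega) (by omega) (by push_cast; omega)]
    rw [show ((l1.length : Int)).toNat = l1.length from by omega,
      show ((j : Nat) : Int).toNat = j from by omega]
    rw [tblF_read l1 l2 l1.length l1.length j (le_refl _)]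
    rfl
  induction K with
  | zero =>
    rw [show ((0 : Nat) : Int) + 1 = 0 + 1 from by norm_num,
      PySem.List.pyRange_one_cons (by omega), PySem.List.pyRange_one_eq_nil (by omega)]
    simp only [List.foldl_cons, List.foldl_nil]
    rw [show (0 : Int) = ((0 : Nat) : Int) from by norm_num] at *
    rw [hread 0 (by omega)]
    have h1 : listMax (fun j => Gij l1 l2 l1.length j) (0 + 1) = 0 := by
      show max (listMax (fun j => Gij l1 l2 l1.length j) 0) (Gij l1 l2 l1.length 0) = 0
      simp [listMax, Gij_zero_right]
    rw [h1]
    simp [Gij_zero_right]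
  | succ K ih =>
    rw [show ((K + 1 : Nat) : Int) + 1 = ((K : Int) + 1) + 1 from by push_cast; ring,
      PySem.List.pyRange_one_succ_right (by omega : (0 : Int) ≤ ((K : Nat) : Int) + 1),
      List.foldl_append, ih (by omega)]
    simp only [List.foldl_cons, List.foldl_nil]
    rw [show (K : Int) + 1 = ((K + 1 : Nat) : Int) from by push_cast; ring]
    rw [hread (K + 1) (by omega)]
    rw [show listMax (fun j => Gij l1 l2 l1.length j) (K + 1 + 1)
        = max (listMax (fun j => Gij l1 l2 l1.length j) (K + 1)) (Gij l1 l2 l1.length (K + 1))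
        from rfl]
    congr 1
    push_cast
    omega

theorem AEq (str1 str2 : String) (hn : str1.toList.length ≠ 0) (hm : str2.toList.length ≠ 0) :
    minDelete2 str1 str2
      = (str1.toList.length : Int)
        - (listMax (Gj str1.toList str2.toList) (str2.toList.length + 1) : Int) := by
  simp only [minDelete2]
  rw [if_neg (by exact_mod_cast hn), if_neg (by exact_mod_cast hm)]
  rw [bnd_fold str1.toList str2.toList,
    outer_fold str1.toList str2.toList str1.toList.length (le_refl _),
    ans_fold str1.toList str2.toList (by omega) str2.toList.length (le_refl _)]
  rw [Option.getD_some]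
  have hfun : (fun j => Gij str1.toList str2.toList str1.toList.length j)
      = Gj str1.toList str2.toList := by
    funext j; exact Gij_full _ _ _
  rw [hfun]

-- ===== VERDICT (by name: the statement is the Claim_ definition above) =====
theorem minDelete2_spec : Claim_equal_minDelete2 := by
  intro str1 str2 _
  unfold Spec_minDelete2
  by_cases hn : str1.toList.length = 0
  · have hA : minDelete2 str1 str2 = 0 := by
      simp only [minDelete2]
      rw [if_pos (by exact_mod_cast hn)]
    have hB : minDelete2_alt str1 str2 = 0 := by
      simp only [minDelete2_alt]
      rw [if_pos (by exact_mod_cast hn)]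
    rw [hA, hB]
  · by_cases hm : str2.toList.length = 0
    · have hA : minDelete2 str1 str2 = (str1.toList.length : Int) := by
        simp only [minDelete2]
        rw [if_neg (by exact_mod_cast hn), if_pos (by exact_mod_cast hm)]
      have hB : minDelete2_alt str1 str2 = (str1.toList.length : Int) := by
        simp only [minDelete2_alt]
        rw [if_neg (by exact_mod_cast hn), if_pos (by exact_mod_cast hm)]
      rw [hA, hB]
    · rw [AEq str1 str2 hn hm, altEq str1 str2 hn hm, maxFG str1.toList str2.toList]
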